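-- pv_equiv track=rewrite | github.com/pedrolara-boop/StashStudioSync | plugins/StudioSync/StudioSync.py | analyze_word_lengths
-- ===== SOURCE A (Python) =====
-- def analyze_word_lengths(name1, name2):
--     """Analyze word lengths and positions for better matching"""
--     words1 = name1.lower().split()
--     words2 = name2.lower().split()
--
--     score = 0
--     # Longer words are more significant
--     for w1 in words1:
--         if len(w1) > 4:  # Only consider significant words
--             if w1 in words2:
--                 score += 30
--             else:
--                 score -= 20  # Penalty for missing significant words
--
--     return score
-- ===== SOURCE B (Python) =====
-- def analyze_word_lengths(name1, name2):
--     """Analyze word lengths and positions for better matching"""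
--     # Build a frequency index of name1's significant words, then scan name2's
--     # distinct words once, accumulating lookups (traversal direction reversed).
--     freq = {}
--     total = 0
--     for w in name1.lower().split():
--         if len(w) > 4:
--             freq[w] = freq.get(w, 0) + 1
--             total += 1
--     hits = 0
--     for w in set(name2.lower().split()):
--         hits += freq.get(w, 0)
--     return 50 * hits - 20 * total
-- ===== Notes on version B (the rewrite author's own statement) =====
-- stated objective: alternative
-- what changed: Instead of scanning name1's words and testing each for membership in name2's word list, B builds a frequency index of name1's significant words and then iterates over name2's distinct words, summing index lookups; the score comes from the closed formula 50*hits - 20*total.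
import Mathlib
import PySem

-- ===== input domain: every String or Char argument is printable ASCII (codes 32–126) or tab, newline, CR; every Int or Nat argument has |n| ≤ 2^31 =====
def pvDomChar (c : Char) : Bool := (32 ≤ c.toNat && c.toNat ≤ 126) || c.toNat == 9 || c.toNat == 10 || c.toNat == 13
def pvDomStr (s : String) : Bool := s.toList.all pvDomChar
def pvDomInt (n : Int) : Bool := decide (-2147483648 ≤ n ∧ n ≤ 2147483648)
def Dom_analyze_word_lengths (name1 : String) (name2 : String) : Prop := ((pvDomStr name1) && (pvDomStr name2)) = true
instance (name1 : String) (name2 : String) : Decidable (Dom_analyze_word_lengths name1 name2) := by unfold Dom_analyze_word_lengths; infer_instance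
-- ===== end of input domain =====

-- B reverses the traversal: it indexes name1's significant words by frequency, then scans
-- name2's distinct words once, summing index lookups into 50*hits - 20*total (objective: alternative).

-- ===== PORT A =====
def analyze_word_lengths (name1 : String) (name2 : String) : Int :=
  let words1 := PySem.Str.split₀ (PySem.Str.lower name1)
  let words2 := PySem.Str.split₀ (PySem.Str.lower name2)
  words1.foldl (fun score w1 =>
    if PySem.Str.len w1 > 4 then
      if words2.contains w1 then score + 30 else score - 20
    else score) 0

-- ===== PORT B =====
def analyze_word_lengths_alt (name1 : String) (name2 : String) : Int :=
  -- frequency index of name1's significant words, with the running total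
  let st := (PySem.Str.split₀ (PySem.Str.lower name1)).foldl
    (fun (st : PySem.Dict String Int × Int) w =>
      if PySem.Str.len w > 4 then (st.1.insert w (st.1.getD w 0 + 1), st.2 + 1) else st)
    (PySem.Dict.empty, 0)
  -- one pass over name2's distinct words, summing lookups
  let hits := (PySem.Set.ofList (PySem.Str.split₀ (PySem.Str.lower name2))).foldl
    (fun acc w => acc + st.1.getD w 0) (0 : Int)
  50 * hits - 20 * st.2

-- ===== PRECONDITION & SPEC =====
def Spec_analyze_word_lengths (name1 : String) (name2 : String) (out : Int) : Prop := out = analyze_word_lengths_alt name1 name2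
instance (name1 : String) (name2 : String) (out : Int) : Decidable (Spec_analyze_word_lengths name1 name2 out) := by unfold Spec_analyze_word_lengths; infer_instance

-- ===== CLAIM =====
def Claim_equal_analyze_word_lengths : Prop := ∀ (name1 : String) (name2 : String), Dom_analyze_word_lengths name1 name2 → Spec_analyze_word_lengths name1 name2 (analyze_word_lengths name1 name2)

-- ===== LEMMAS AND PROOFS =====

-- A's loop in closed form over the filtered word list
theorem fold_closed (M : List String) (L : List String) (acc : Int) :
    L.foldl (fun score w1 =>
      if PySem.Str.len w1 > 4 then
        if M.contains w1 then score + 30 else score - 20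
      else score) acc
    = acc + 50 * (((L.filter (fun w => PySem.Str.len w > 4)).countP (fun w => M.contains w) : Nat) : Int)
        - 20 * (((L.filter (fun w => PySem.Str.len w > 4)).length : Nat) : Int) := by
  induction L generalizing acc with
  | nil => simp
  | cons w L ih =>
    simp only [List.foldl_cons, List.filter_cons]
    by_cases hp : PySem.Str.len w > 4
    · simp only [hp, decide_true, if_true]
      by_cases hm : M.contains w = true
      · rw [if_pos hm, ih]
        simp only [List.countP_cons, hm, if_true, List.length_cons]
        push_cast; ring
      · rw [if_neg hm, ih]
        simp only [List.countP_cons, hm, List.length_cons]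
        push_cast; ring
    · simp only [hp, decide_false, if_false]
      exact ih acc

-- B's first loop: the pair it builds is (counter of the filtered words over d, t + their number)
theorem fold_index (L : List String) (d : PySem.Dict String Int) (t : Int) :
    L.foldl (fun (st : PySem.Dict String Int × Int) w =>
        if PySem.Str.len w > 4 then (st.1.insert w (st.1.getD w 0 + 1), st.2 + 1) else st) (d, t)
    = ((L.filter (fun w => PySem.Str.len w > 4)).foldl
         (fun d w => d.insert w (d.getD w 0 + 1)) d,
       t + ((L.filter (fun w => PySem.Str.len w > 4)).length : Int)) := by
  induction L generalizing d t with
  | nil => simp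
  | cons w L ih =>
    simp only [List.foldl_cons, List.filter_cons]
    by_cases hp : PySem.Str.len w > 4
    · simp only [hp, decide_true, if_true, List.foldl_cons, ih, List.length_cons,
        Prod.mk.injEq]
      exact ⟨trivial, by push_cast; ring⟩
    · simp only [hp, decide_false, if_false, ih]
      simp

-- counting members of a nodup list: countP over (· ∈ d :: D) splits off count of d
theorem countP_contains_cons (sig : List String) (d : String) (D : List String) (hd : d ∉ D) :
    sig.countP (fun w => (d :: D).contains w)
      = sig.count d + sig.countP (fun w => D.contains w) := by
  induction sig with
  | nil => simp
  | cons x sig ih =>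
    simp only [List.countP_cons, List.count_cons, ih]
    by_cases hx : x = d
    · subst hx
      simp [hd]
      omega
    · simp only [List.contains_cons]
      have hb : (x == d) = false := by simpa using hx
      simp [hb]
      omega

-- B's second loop: summing counts over a nodup list equals countP of membership
theorem fold_hits (sig : List String) (D : List String) (hD : D.Nodup) (acc : Int) :
    D.foldl (fun acc w => acc + (sig.count w : Int)) acc
      = acc + (sig.countP (fun w => D.contains w) : Int) := by
  induction D generalizing acc with
  | nil => simp
  | cons d D ih =>
    simp only [List.foldl_cons]
    rw [ih (List.Nodup.of_cons hD), countP_contains_cons sig d D (by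
      intro h; exact (List.nodup_cons.mp hD).1 h)]
    push_cast; ring

-- ===== VERDICT =====
theorem analyze_word_lengths_spec : Claim_equal_analyze_word_lengths := by
  intro name1 name2 _
  unfold Spec_analyze_word_lengths analyze_word_lengths analyze_word_lengths_alt
  simp only [fold_closed, fold_index, PySem.Dict.getD_foldl_insert_add_one,
    PySem.Dict.getD_empty, zero_add]
  rw [fold_hits _ _ (PySem.Set.nodup_ofList _)]
  have hc : ∀ w : String,
      List.contains (PySem.Set.ofList (PySem.Str.split₀ (PySem.Str.lower name2))) w
        = (PySem.Str.split₀ (PySem.Str.lower name2)).contains w := fun w => by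
    simp [List.contains_eq_mem, PySem.Set.mem_ofList]
  simp only [hc]
  ring
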